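-- pv_equiv track=rewrite | github.com/seonghyunban/CSC384-Introduction-to-Artificial-Intelligence | A1/Sokoban_Tester/solution.py | sum_min_dist_manhattan_path
-- ===== SOURCE A (Python) =====
-- import itertools
--
-- def sum_min_dist_manhattan_path(boxes, goals, obstacle):
--
--     distance = [[manhattan(box, goal) for goal in goals] for box in boxes]
--
--     for i in range(len(goals) - len(boxes)):
--         distance.append([0] * len(goals))
--
--     box_permutation = itertools.permutations(list(range(len(goals))))
--     goals = list(range(len(goals)))
--
--     min_dist = min(sum(distance[boxes[i]][i] for i in goals ) for boxes in box_permutation)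
--     return min_dist
--
-- def manhattan(box, goal):
--     return abs(goal[0] - box[0]) + abs(goal[1] - box[1])
-- ===== SOURCE B (Python) =====
-- def sum_min_dist_manhattan_path(boxes, goals, obstacle):
--     n = len(goals)
--     m = len(boxes)
--
--     def cost(r, c):
--         if r < m:
--             b = boxes[r]
--             g = goals[c]
--             return abs(g[0] - b[0]) + abs(g[1] - b[1])
--         return 0
--
--     def solve(c, avail):
--         if not avail:
--             return 0
--         best = None
--         for r in avail:
--             v = cost(r, c) + solve(c + 1, [x for x in avail if x != r])
--             if best is None or v < best:
--                 best = v
--         return best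
--
--     return solve(0, list(range(n)))
-- ===== Notes on version B (the rewrite author's own statement) =====
-- stated objective: alternative
-- what changed: A precomputes a zero-padded distance matrix and takes the min over all n! goal permutations, summing each from the matrix; B instead does a recursive search that assigns each column in turn to one of the remaining rows, computing Manhattan costs on demand and sharing common assignment prefixes.
import Mathlib
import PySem

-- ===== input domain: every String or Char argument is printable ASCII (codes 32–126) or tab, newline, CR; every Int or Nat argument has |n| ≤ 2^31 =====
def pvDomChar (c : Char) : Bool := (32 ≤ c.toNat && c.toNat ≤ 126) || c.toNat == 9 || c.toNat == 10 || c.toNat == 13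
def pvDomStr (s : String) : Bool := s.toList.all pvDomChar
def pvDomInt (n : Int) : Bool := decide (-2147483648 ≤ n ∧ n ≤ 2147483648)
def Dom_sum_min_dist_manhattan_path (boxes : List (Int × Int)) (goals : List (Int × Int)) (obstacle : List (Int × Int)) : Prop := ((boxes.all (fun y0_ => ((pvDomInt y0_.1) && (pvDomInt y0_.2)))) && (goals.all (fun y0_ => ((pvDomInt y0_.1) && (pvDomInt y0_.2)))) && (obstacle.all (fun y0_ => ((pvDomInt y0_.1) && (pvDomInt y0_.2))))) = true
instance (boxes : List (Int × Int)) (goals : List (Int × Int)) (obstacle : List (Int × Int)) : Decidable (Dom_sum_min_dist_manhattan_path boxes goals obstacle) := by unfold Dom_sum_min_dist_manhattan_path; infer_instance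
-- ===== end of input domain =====

-- B replaces A's enumeration of all n! permutations (each summed from scratch) by a
-- recursive branch-over-remaining-rows search with on-demand costs (objective: alternative).

-- ===== PORT A =====
-- helper `manhattan` of the Python module
def pvManhattan (box goal : Int × Int) : Int := |goal.1 - box.1| + |goal.2 - box.2|

-- min of a nonempty list (Python's `min`; A only applies it to nonempty lists,
-- since `permutations` always yields at least one tuple)
def pvListMin : List Int → Int
  | [] => 0
  | x :: xs => xs.foldl min x

-- literal port of A: distance matrix, zero-padding rows, min over all permutations.
-- All list indexings are in range on every input, so `getD` is exact for Python's `[]`.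
def sum_min_dist_manhattan_path (boxes : List (Int × Int)) (goals : List (Int × Int)) (obstacle : List (Int × Int)) : Int :=
  let distance : List (List Int) :=
    boxes.map (fun b => goals.map (fun g => pvManhattan b g))
      ++ (List.range (goals.length - boxes.length)).map
          (fun _ => List.replicate goals.length (0 : Int))
  let idxs := List.range goals.length
  pvListMin (idxs.permutations.map
    (fun p => (idxs.map (fun i => (distance.getD (p.getD i 0) []).getD i 0)).sum))

-- ===== PORT B =====
-- B's local `cost(r, c)`
def pvCost (boxes : List (Int × Int)) (goals : List (Int × Int)) (r c : Nat) : Int :=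
  if r < boxes.length then
    let b := boxes.getD r (0, 0)
    let g := goals.getD c (0, 0)
    |g.1 - b.1| + |g.2 - b.2|
  else 0

-- termination measure for `pvSolve` (cited in its decreasing_by)
theorem pv_filter_ne_lt {r : Nat} {l : List Nat} (h : r ∈ l) :
    (l.filter (fun x => x ≠ r)).length < l.length := by
  rw [List.length_filter_lt_length_iff_exists]
  exact ⟨r, h, by simp⟩

-- B's local `solve(c, avail)`: pick each remaining row for column c, recurse on the rest
def pvSolve (cost : Nat → Nat → Int) (c : Nat) (avail : List Nat) : Int :=
  match avail with
  | [] => 0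
  | r0 :: rest =>
    pvListMin ((r0 :: rest).attach.map
      (fun x => cost x.1 c + pvSolve cost (c + 1) ((r0 :: rest).filter (fun y => y ≠ x.1))))
termination_by avail.length
decreasing_by exact pv_filter_ne_lt x.2

def sum_min_dist_manhattan_path_alt (boxes : List (Int × Int)) (goals : List (Int × Int)) (obstacle : List (Int × Int)) : Int :=
  pvSolve (pvCost boxes goals) 0 (List.range goals.length)

-- ===== PRECONDITION & SPEC =====
def Spec_sum_min_dist_manhattan_path (boxes : List (Int × Int)) (goals : List (Int × Int)) (obstacle : List (Int × Int)) (out : Int) : Prop := out = sum_min_dist_manhattan_path_alt boxes goals obstacle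
instance (boxes : List (Int × Int)) (goals : List (Int × Int)) (obstacle : List (Int × Int)) (out : Int) : Decidable (Spec_sum_min_dist_manhattan_path boxes goals obstacle out) := by unfold Spec_sum_min_dist_manhattan_path; infer_instance

-- ===== CLAIM (what is proved, stated in full; the proofs are below) =====
def Claim_equal_sum_min_dist_manhattan_path : Prop := ∀ (boxes : List (Int × Int)) (goals : List (Int × Int)) (obstacle : List (Int × Int)), Dom_sum_min_dist_manhattan_path boxes goals obstacle → Spec_sum_min_dist_manhattan_path boxes goals obstacle (sum_min_dist_manhattan_path boxes goals obstacle)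

-- ===== LEMMAS AND PROOFS =====

-- cost of assigning rows p (in order) to columns c, c+1, …
def pvAssignSum (cost : Nat → Nat → Int) : Nat → List Nat → Int
  | _, [] => 0
  | c, r :: q => cost r c + pvAssignSum cost (c + 1) q

theorem pv_foldl_min_le_init (xs : List Int) (a : Int) : xs.foldl min a ≤ a := by
  induction xs generalizing a with
  | nil => simp
  | cons x xs ih => exact le_trans (ih (min a x)) (min_le_left a x)

theorem pv_foldl_min_le_mem {xs : List Int} {x : Int} (h : x ∈ xs) (a : Int) :
    xs.foldl min a ≤ x := by
  induction xs generalizing a with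
  | nil => simp at h
  | cons y ys ih =>
    rcases List.mem_cons.mp h with rfl | h
    · exact le_trans (pv_foldl_min_le_init ys (min a x)) (min_le_right a x)
    · exact ih h (min a y)

theorem pv_foldl_min_mem (xs : List Int) (a : Int) : xs.foldl min a ∈ a :: xs := by
  induction xs generalizing a with
  | nil => simp
  | cons x xs ih =>
    show xs.foldl min (min a x) ∈ a :: x :: xs
    rcases List.mem_cons.mp (ih (min a x)) with h | h
    · rcases min_choice a x with hm | hm <;> rw [h, hm] <;> simp
    · simp [h]

theorem pvListMin_le {l : List Int} {x : Int} (h : x ∈ l) : pvListMin l ≤ x := by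
  cases l with
  | nil => simp at h
  | cons y ys =>
    rcases List.mem_cons.mp h with rfl | h
    · exact pv_foldl_min_le_init ys x
    · exact pv_foldl_min_le_mem h y

theorem pvListMin_mem {l : List Int} (h : l ≠ []) : pvListMin l ∈ l := by
  cases l with
  | nil => simp at h
  | cons y ys => exact pv_foldl_min_mem ys y

theorem pvSolve_le (cost : Nat → Nat → Int) :
    ∀ (p avail : List Nat) (c : Nat), avail.Nodup → p.Perm avail →
      pvSolve cost c avail ≤ pvAssignSum cost c p := by
  intro p
  induction p with
  | nil =>
    intro avail c _ hperm
    have : avail = [] := hperm.symm.eq_nil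
    subst this
    rw [pvSolve]
    simp [pvAssignSum]
  | cons r q ih =>
    intro avail c hnd hperm
    obtain ⟨hr, hq⟩ := List.cons_perm_iff_perm_erase.mp hperm
    have herase : avail.erase r = avail.filter (fun y => y ≠ r) := by
      simpa using hnd.erase_eq_filter r
    obtain ⟨r0, rest, rfl⟩ : ∃ r0 rest, avail = r0 :: rest := by
      cases avail with
      | nil => simp at hr
      | cons a l => exact ⟨a, l, rfl⟩
    have hmem : (cost r c + pvSolve cost (c + 1) ((r0 :: rest).filter (fun y => y ≠ r)))
        ∈ ((r0 :: rest).attach.map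
          (fun x => cost x.1 c + pvSolve cost (c + 1) ((r0 :: rest).filter (fun y => y ≠ x.1)))) :=
      List.mem_map.mpr ⟨⟨r, hr⟩, List.mem_attach _ _, rfl⟩
    have h1 : pvSolve cost c (r0 :: rest)
        ≤ cost r c + pvSolve cost (c + 1) ((r0 :: rest).filter (fun y => y ≠ r)) := by
      rw [pvSolve]; exact pvListMin_le hmem
    have h2 : pvSolve cost (c + 1) ((r0 :: rest).filter (fun y => y ≠ r))
        ≤ pvAssignSum cost (c + 1) q := by
      rw [← herase]
      exact ih _ _ (hnd.erase r) hq
    calc pvSolve cost c (r0 :: rest)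
        ≤ cost r c + pvSolve cost (c + 1) ((r0 :: rest).filter (fun y => y ≠ r)) := h1
      _ ≤ cost r c + pvAssignSum cost (c + 1) q := add_le_add (le_refl _) h2
      _ = pvAssignSum cost c (r :: q) := rfl

theorem pvSolve_mem (cost : Nat → Nat → Int) :
    ∀ (N : Nat) (avail : List Nat) (c : Nat), avail.length ≤ N → avail.Nodup →
      ∃ p, p.Perm avail ∧ pvSolve cost c avail = pvAssignSum cost c p := by
  intro N
  induction N with
  | zero =>
    intro avail c hlen _
    have : avail = [] := List.eq_nil_of_length_eq_zero (Nat.le_zero.mp hlen)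
    subst this
    exact ⟨[], List.Perm.refl _, by simp [pvSolve, pvAssignSum]⟩
  | succ N ih =>
    intro avail c hlen hnd
    cases avail with
    | nil => exact ⟨[], List.Perm.refl _, by simp [pvSolve, pvAssignSum]⟩
    | cons r0 rest =>
      have hne : ((r0 :: rest).attach.map
          (fun x => cost x.1 c + pvSolve cost (c + 1) ((r0 :: rest).filter (fun y => y ≠ x.1)))) ≠ [] := by
        simp
      have hmem := pvListMin_mem hne
      obtain ⟨⟨r, hr⟩, -, heq⟩ := List.mem_map.mp hmem
      have hflt : ((r0 :: rest).filter (fun y => y ≠ r)).length ≤ N := by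
        have := pv_filter_ne_lt hr
        omega
      obtain ⟨q, hqperm, hqeq⟩ := ih ((r0 :: rest).filter (fun y => y ≠ r)) (c + 1) hflt
        (hnd.filter _)
      have herase : (r0 :: rest).erase r = (r0 :: rest).filter (fun y => y ≠ r) := by
        simpa using hnd.erase_eq_filter r
      refine ⟨r :: q, List.cons_perm_iff_perm_erase.mpr ⟨hr, by rw [herase]; exact hqperm⟩, ?_⟩
      rw [pvSolve, ← heq]
      show cost r c + _ = cost r c + pvAssignSum cost (c + 1) q
      congr 1

theorem pvAssignSum_eq_sum_range (cost : Nat → Nat → Int) :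
    ∀ (p : List Nat) (c : Nat),
      pvAssignSum cost c p
        = ((List.range p.length).map (fun i => cost (p.getD i 0) (c + i))).sum := by
  intro p
  induction p with
  | nil => intro c; simp [pvAssignSum]
  | cons r q ih =>
    intro c
    have hcons : pvAssignSum cost c (r :: q) = cost r c + pvAssignSum cost (c + 1) q := rfl
    rw [hcons, ih (c + 1), List.length_cons, List.range_succ_eq_map, List.map_cons,
      List.map_map, List.sum_cons]
    have hpt : ∀ i ∈ List.range q.length,
        cost (q.getD i 0) (c + 1 + i)
          = ((fun i => cost ((r :: q).getD i 0) (c + i)) ∘ Nat.succ) i := by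
      intro i _
      simp only [Function.comp_apply, Nat.succ_eq_add_one, List.getD_cons_succ]
      congr 1
      omega
    rw [List.map_congr_left hpt]
    simp

-- the (r, i) entry of A's padded distance matrix is B's cost(r, i)
theorem pv_row_entry (boxes goals : List (Int × Int)) (r i : Nat)
    (hr : r < goals.length) (hi : i < goals.length) :
    ((boxes.map (fun b => goals.map (fun g => pvManhattan b g))
        ++ (List.range (goals.length - boxes.length)).map
            (fun _ => List.replicate goals.length (0 : Int))).getD r []).getD i 0
      = pvCost boxes goals r i := by
  by_cases hm : r < boxes.length
  · simp only [List.getD_eq_getElem?_getD]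
    rw [List.getElem?_append_left (by simpa using hm)]
    rw [List.getElem?_map, List.getElem?_eq_getElem hm]
    simp only [Option.map_some, Option.getD_some]
    rw [List.getElem?_map, List.getElem?_eq_getElem hi]
    simp [pvCost, hm, pvManhattan, List.getD_eq_getElem?_getD,
      List.getElem?_eq_getElem hm, List.getElem?_eq_getElem hi]
  · have hml : boxes.length ≤ r := Nat.le_of_not_lt hm
    have hidx : r - boxes.length < goals.length - boxes.length := by omega
    simp only [List.getD_eq_getElem?_getD]
    rw [List.getElem?_append_right (by simpa using hml)]
    have hrange : (List.range (goals.length - boxes.length))[r - boxes.length]?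
        = some (r - boxes.length) := List.getElem?_range hidx
    simp only [List.length_map, List.getElem?_map, hrange]
    simp [pvCost, hm, hi]

theorem pv_map_sum_eq_assign (boxes goals : List (Int × Int)) (p : List Nat)
    (hperm : p.Perm (List.range goals.length)) :
    ((List.range goals.length).map
        (fun i => ((boxes.map (fun b => goals.map (fun g => pvManhattan b g))
            ++ (List.range (goals.length - boxes.length)).map
                (fun _ => List.replicate goals.length (0 : Int))).getD (p.getD i 0) []).getD i 0)).sum
      = pvAssignSum (pvCost boxes goals) 0 p := by
  have hlen : p.length = goals.length := by simpa using hperm.length_eq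
  rw [pvAssignSum_eq_sum_range, hlen]
  congr 1
  apply List.map_congr_left
  intro i hi
  have hi' : i < goals.length := List.mem_range.mp hi
  have hpmem : p.getD i 0 ∈ p := by
    rw [List.getD_eq_getElem?_getD, List.getElem?_eq_getElem (by omega)]
    exact List.getElem_mem _
  have hpr : p.getD i 0 < goals.length := List.mem_range.mp (hperm.mem_iff.mp hpmem)
  rw [pv_row_entry boxes goals _ i hpr hi']
  norm_num

-- ===== VERDICT (by name: the statement is the Claim_ definition above) =====
theorem sum_min_dist_manhattan_path_spec : Claim_equal_sum_min_dist_manhattan_path := by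
  intro boxes goals obstacle _
  unfold Spec_sum_min_dist_manhattan_path
  unfold sum_min_dist_manhattan_path sum_min_dist_manhattan_path_alt
  simp only []
  set n := goals.length with hn
  set dist := boxes.map (fun b => goals.map (fun g => pvManhattan b g))
      ++ (List.range (n - boxes.length)).map (fun _ => List.replicate n (0 : Int)) with hdist
  set f : List Nat → Int :=
    (fun p => ((List.range n).map (fun i => (dist.getD (p.getD i 0) []).getD i 0)).sum) with hf
  have hnd : (List.range n).Nodup := List.nodup_range
  -- B is attained by some permutation
  obtain ⟨pB, hpB, hB⟩ := pvSolve_mem (pvCost boxes goals) (List.range n).length (List.range n) 0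
    le_rfl hnd
  -- A is attained by some permutation
  have hAne : ((List.range n).permutations.map f) ≠ [] := by
    have : (List.range n) ∈ (List.range n).permutations := List.mem_permutations.mpr (List.Perm.refl _)
    intro hcontra
    rw [List.map_eq_nil_iff] at hcontra
    simp [hcontra] at this
  obtain ⟨pA, hpAmem, hA⟩ := List.mem_map.mp (pvListMin_mem hAne)
  have hpA : pA.Perm (List.range n) := List.mem_permutations.mp hpAmem
  apply le_antisymm
  · -- A's min ≤ f pB = B
    have hmem : f pB ∈ (List.range n).permutations.map f :=
      List.mem_map.mpr ⟨pB, List.mem_permutations.mpr hpB, rfl⟩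
    calc pvListMin ((List.range n).permutations.map f)
        ≤ f pB := pvListMin_le hmem
      _ = pvAssignSum (pvCost boxes goals) 0 pB := pv_map_sum_eq_assign boxes goals pB hpB
      _ = pvSolve (pvCost boxes goals) 0 (List.range n) := hB.symm
  · -- B ≤ f pA = A
    calc pvSolve (pvCost boxes goals) 0 (List.range n)
        ≤ pvAssignSum (pvCost boxes goals) 0 pA := pvSolve_le _ pA _ 0 hnd hpA
      _ = f pA := (pv_map_sum_eq_assign boxes goals pA hpA).symm
      _ = pvListMin ((List.range n).permutations.map f) := hA
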